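-- pv_equiv track=rewrite | github.com/serhatvs/Astro_Hack_MVP | app/services/recommender.py | _build_system_change_scope_summary
-- ===== SOURCE A (Python) =====
-- def _build_system_change_scope_summary(system_changes: list[str]) -> str:
--     if not system_changes:
--         return "The stack held configuration"
--
--     changed_layers: list[str] = []
--     if any(change.startswith("crop:") for change in system_changes):
--         changed_layers.append("crop")
--     if any(change.startswith("algae:") for change in system_changes):
--         changed_layers.append("algae")
--     if any(change.startswith("microbial:") for change in system_changes):
--         changed_layers.append("microbial")
--     if any(change.startswith("grow_system:") for change in system_changes):
--         changed_layers.append("plant system")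
--
--     if not changed_layers:
--         return "The stack reconfigured"
--     if len(changed_layers) == 1:
--         return f"The {changed_layers[0]} layer reconfigured"
--     if len(changed_layers) == 2:
--         return f"The {changed_layers[0]} and {changed_layers[1]} layers reconfigured"
--     return f"The stack reconfigured across {', '.join(changed_layers[:-1])}, and {changed_layers[-1]}"
-- ===== SOURCE B (Python) =====
-- _PREFIX_LABELS = [
--     ("crop:", "crop"),
--     ("algae:", "algae"),
--     ("microbial:", "microbial"),
--     ("grow_system:", "plant system"),
-- ]
--
--
-- def _build_system_change_scope_summary(system_changes: list[str]) -> str: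
--     if not system_changes:
--         return "The stack held configuration"
--
--     found: set[str] = set()
--     for change in system_changes:
--         for prefix, label in _PREFIX_LABELS:
--             if change.startswith(prefix):
--                 found.add(label)
--
--     changed_layers = [label for _, label in _PREFIX_LABELS if label in found]
--
--     if not changed_layers:
--         return "The stack reconfigured"
--     if len(changed_layers) == 1:
--         return f"The {changed_layers[0]} layer reconfigured"
--     if len(changed_layers) == 2:
--         return f"The {changed_layers[0]} and {changed_layers[1]} layers reconfigured"
--     return f"The stack reconfigured across {', '.join(changed_layers[:-1])}, and {changed_layers[-1]}"
-- ===== Notes on version B (the rewrite author's own statement) =====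
-- stated objective: alternative
-- what changed: Replaces A's four independent full scans of system_changes (one any() per prefix) by a single pass that folds every change against a prefix->label table into a set, then rebuilds the ordered layer list by filtering the table against that set; the formatting tail is kept.
import Mathlib
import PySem

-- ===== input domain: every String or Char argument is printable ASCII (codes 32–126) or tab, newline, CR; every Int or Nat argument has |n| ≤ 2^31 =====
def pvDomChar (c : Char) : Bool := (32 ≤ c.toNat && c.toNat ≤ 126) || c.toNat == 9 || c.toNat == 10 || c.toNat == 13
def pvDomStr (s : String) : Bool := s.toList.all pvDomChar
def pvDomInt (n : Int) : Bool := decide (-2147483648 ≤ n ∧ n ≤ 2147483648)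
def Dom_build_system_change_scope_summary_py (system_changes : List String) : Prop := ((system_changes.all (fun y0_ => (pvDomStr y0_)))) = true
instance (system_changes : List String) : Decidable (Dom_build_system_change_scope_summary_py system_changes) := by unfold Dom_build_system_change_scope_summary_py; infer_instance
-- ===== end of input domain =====

-- B replaces A's four independent full scans (one any() per prefix) by a single pass building a
-- set of hit labels from a prefix->label table, then filters the table to rebuild the ordered list;
-- objective: alternative (same cost class, different shape).
-- ===== PORT A =====
def build_system_change_scope_summary_py (system_changes : List String) : String :=
  if system_changes.isEmpty then "The stack held configuration"
  else
    let changed_layers : List String := []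
    let changed_layers := if system_changes.any (fun change => PySem.Str.startswith change "crop:") then changed_layers ++ ["crop"] else changed_layers
    let changed_layers := if system_changes.any (fun change => PySem.Str.startswith change "algae:") then changed_layers ++ ["algae"] else changed_layers
    let changed_layers := if system_changes.any (fun change => PySem.Str.startswith change "microbial:") then changed_layers ++ ["microbial"] else changed_layers
    let changed_layers := if system_changes.any (fun change => PySem.Str.startswith change "grow_system:") then changed_layers ++ ["plant system"] else changed_layers
    if changed_layers.isEmpty then "The stack reconfigured"
    else if changed_layers.length = 1 then
      PySem.Str.join "" ["The ", PySem.List.pyGetD changed_layers 0 "", " layer reconfigured"]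
    else if changed_layers.length = 2 then
      PySem.Str.join "" ["The ", PySem.List.pyGetD changed_layers 0 "", " and ", PySem.List.pyGetD changed_layers 1 "", " layers reconfigured"]
    else
      PySem.Str.join "" ["The stack reconfigured across ", PySem.Str.join ", " (PySem.List.slice changed_layers none (some (-1))), ", and ", PySem.List.pyGetD changed_layers (-1) ""]

-- ===== PORT B =====
-- the module-level prefix -> label table of Source B
def pvPrefixLabels : List (String × String) :=
  [("crop:", "crop"), ("algae:", "algae"), ("microbial:", "microbial"), ("grow_system:", "plant system")]

-- the body of Source B's inner loop: test one change against every table row, adding hits to the set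
def pvAddLayers (s : PySem.Set String) (change : String) : PySem.Set String :=
  pvPrefixLabels.foldl (fun s pl => if PySem.Str.startswith change pl.1 then PySem.Set.add s pl.2 else s) s

def build_system_change_scope_summary_py_alt (system_changes : List String) : String :=
  if system_changes.isEmpty then "The stack held configuration"
  else
    let found : PySem.Set String := system_changes.foldl pvAddLayers PySem.Set.empty
    let changed_layers := (pvPrefixLabels.filter (fun pl => PySem.Set.contains found pl.2)).map (fun pl => pl.2)
    if changed_layers.isEmpty then "The stack reconfigured"
    else if changed_layers.length = 1 then
      PySem.Str.join "" ["The ", PySem.List.pyGetD changed_layers 0 "", " layer reconfigured"]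
    else if changed_layers.length = 2 then
      PySem.Str.join "" ["The ", PySem.List.pyGetD changed_layers 0 "", " and ", PySem.List.pyGetD changed_layers 1 "", " layers reconfigured"]
    else
      PySem.Str.join "" ["The stack reconfigured across ", PySem.Str.join ", " (PySem.List.slice changed_layers none (some (-1))), ", and ", PySem.List.pyGetD changed_layers (-1) ""]

-- ===== PRECONDITION & SPEC =====
def Spec_build_system_change_scope_summary_py (system_changes : List String) (out : String) : Prop := out = build_system_change_scope_summary_py_alt system_changes
instance (system_changes : List String) (out : String) : Decidable (Spec_build_system_change_scope_summary_py system_changes out) := by unfold Spec_build_system_change_scope_summary_py; infer_instance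

-- ===== CLAIM (what is proved, stated in full; the proofs are below) =====
def Claim_equal_build_system_change_scope_summary_py : Prop := ∀ (system_changes : List String), Dom_build_system_change_scope_summary_py system_changes → Spec_build_system_change_scope_summary_py system_changes (build_system_change_scope_summary_py system_changes)

-- ===== LEMMAS AND PROOFS =====
-- membership in the set produced by one inner-loop step
theorem mem_addLayers (s : PySem.Set String) (c L P : String)
    (h : (P, L) ∈ pvPrefixLabels) :
    (L ∈ pvAddLayers s c) ↔ (L ∈ s ∨ PySem.Str.startswith c P = true) := by
  fin_cases h <;>
    simp [pvAddLayers, pvPrefixLabels, List.foldl] <;>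
    split_ifs <;>
    simp_all [PySem.Set.mem_add]

-- membership in the set after the whole outer fold = "some change starts with the prefix"
theorem mem_found (xs : List String) (s : PySem.Set String) (L P : String)
    (h : (P, L) ∈ pvPrefixLabels) :
    (L ∈ xs.foldl pvAddLayers s) ↔ (L ∈ s ∨ xs.any (fun c => PySem.Str.startswith c P) = true) := by
  induction xs generalizing s with
  | nil => simp
  | cons x xs ih =>
      simp only [List.foldl_cons, List.any_cons, ih, mem_addLayers _ _ _ _ h, Bool.or_eq_true]
      tauto

theorem contains_found (xs : List String) (L P : String)
    (h : (P, L) ∈ pvPrefixLabels) :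
    PySem.Set.contains (xs.foldl pvAddLayers PySem.Set.empty) L
      = xs.any (fun c => PySem.Str.startswith c P) := by
  have hm := mem_found xs PySem.Set.empty L P h
  simp only [PySem.Set.empty, List.not_mem_nil, false_or] at hm
  cases hb : xs.any (fun c => PySem.Str.startswith c P) <;>
    rw [hb] at hm <;> simp only [iff_false, iff_true, Bool.false_eq_true] at hm <;>
    simp [PySem.Set.contains_eq_listContains, hm]

theorem layers_eq (xs : List String) :
    ((pvPrefixLabels.filter (fun pl => PySem.Set.contains (xs.foldl pvAddLayers PySem.Set.empty) pl.2)).map (fun pl => pl.2))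
    =
    (let l0 : List String := []
     let l1 := if xs.any (fun c => PySem.Str.startswith c "crop:") then l0 ++ ["crop"] else l0
     let l2 := if xs.any (fun c => PySem.Str.startswith c "algae:") then l1 ++ ["algae"] else l1
     let l3 := if xs.any (fun c => PySem.Str.startswith c "microbial:") then l2 ++ ["microbial"] else l2
     if xs.any (fun c => PySem.Str.startswith c "grow_system:") then l3 ++ ["plant system"] else l3) := by
  have c1 := contains_found xs "crop" "crop:" (by simp [pvPrefixLabels])
  have c2 := contains_found xs "algae" "algae:" (by simp [pvPrefixLabels])
  have c3 := contains_found xs "microbial" "microbial:" (by simp [pvPrefixLabels])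
  have c4 := contains_found xs "plant system" "grow_system:" (by simp [pvPrefixLabels])
  simp only [pvPrefixLabels, List.filter, c1, c2, c3, c4]
  cases xs.any (fun c => PySem.Str.startswith c "crop:") <;>
  cases xs.any (fun c => PySem.Str.startswith c "algae:") <;>
  cases xs.any (fun c => PySem.Str.startswith c "microbial:") <;>
  cases xs.any (fun c => PySem.Str.startswith c "grow_system:") <;>
  rfl

-- ===== VERDICT (by name: the statement is the Claim_ definition above) =====
theorem build_system_change_scope_summary_py_spec : Claim_equal_build_system_change_scope_summary_py := by
  intro xs _
  unfold Spec_build_system_change_scope_summary_py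
  unfold build_system_change_scope_summary_py build_system_change_scope_summary_py_alt
  by_cases he : xs.isEmpty
  · simp [he]
  · simp only [he, Bool.false_eq_true, if_false]
    rw [layers_eq xs]
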